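-- pv_equiv track=rewrite | github.com/SE-qinghuang/Semantic-Enriched-Code-Knowledge-Graph-to-Reveal-Unknowns-in-Smart-Contract-Code-Reuse | tools/code_checking.py | check_nodes
-- ===== SOURCE A (Python) =====
-- def check_nodes(cfg1_nodes, cfg2_nodes):
--     same_nodes_pairs = {}
--
--     different_nodes_in_cfg1_nodes = []
--     different_nodes_in_cfg2_nodes = []
--
--     for node_id in cfg1_nodes:
--         different_nodes_in_cfg1_nodes.append(node_id)
--
--     for node_id in cfg2_nodes:
--         different_nodes_in_cfg2_nodes.append(node_id)
--
--     for cfg1_node_id, cfg1_node_expression in cfg1_nodes.items():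
--
--         for cfg2_node_id in different_nodes_in_cfg2_nodes:
--
--             cfg2_node_expression = cfg2_nodes[cfg2_node_id]
--             if cfg1_node_expression == cfg2_node_expression:
--                 same_nodes_pairs[cfg1_node_id] = cfg2_node_id
--
--                 different_nodes_in_cfg1_nodes.remove(cfg1_node_id)
--                 different_nodes_in_cfg2_nodes.remove(cfg2_node_id)
--
--                 break
--
--     return same_nodes_pairs, different_nodes_in_cfg1_nodes, different_nodes_in_cfg2_nodes
-- ===== SOURCE B (Python) =====
-- def check_nodes(cfg1_nodes, cfg2_nodes):
--     # Index cfg2 ids by expression into ordered queues; each cfg1 node takes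
--     # the leftmost not-yet-taken cfg2 id with an equal expression.
--     queues = {}
--     for k2, e2 in cfg2_nodes.items():
--         queues.setdefault(e2, []).append(k2)
--
--     taken = {}           # expression -> how many of its queue are consumed
--     same_nodes_pairs = {}
--     matched2 = set()
--     different_nodes_in_cfg1_nodes = []
--     for k1, e1 in cfg1_nodes.items():
--         q = queues.get(e1, [])
--         j = taken.get(e1, 0)
--         if j < len(q):
--             k2 = q[j]
--             taken[e1] = j + 1
--             same_nodes_pairs[k1] = k2
--             matched2.add(k2)
--         else:
--             different_nodes_in_cfg1_nodes.append(k1)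
--
--     different_nodes_in_cfg2_nodes = [k for k in cfg2_nodes if k not in matched2]
--     return same_nodes_pairs, different_nodes_in_cfg1_nodes, different_nodes_in_cfg2_nodes
-- ===== Notes on version B (the rewrite author's own statement) =====
-- stated objective: faster
-- what changed: Replaces the per-cfg1-node linear scan of the remaining cfg2 ids by a one-pass index of cfg2 ids grouped by expression with a consumed-counter per expression, so each cfg1 node matches in O(1); Pre_ only excludes association lists with duplicate keys, which cannot arise from a Python dict argument.
import Mathlib
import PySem

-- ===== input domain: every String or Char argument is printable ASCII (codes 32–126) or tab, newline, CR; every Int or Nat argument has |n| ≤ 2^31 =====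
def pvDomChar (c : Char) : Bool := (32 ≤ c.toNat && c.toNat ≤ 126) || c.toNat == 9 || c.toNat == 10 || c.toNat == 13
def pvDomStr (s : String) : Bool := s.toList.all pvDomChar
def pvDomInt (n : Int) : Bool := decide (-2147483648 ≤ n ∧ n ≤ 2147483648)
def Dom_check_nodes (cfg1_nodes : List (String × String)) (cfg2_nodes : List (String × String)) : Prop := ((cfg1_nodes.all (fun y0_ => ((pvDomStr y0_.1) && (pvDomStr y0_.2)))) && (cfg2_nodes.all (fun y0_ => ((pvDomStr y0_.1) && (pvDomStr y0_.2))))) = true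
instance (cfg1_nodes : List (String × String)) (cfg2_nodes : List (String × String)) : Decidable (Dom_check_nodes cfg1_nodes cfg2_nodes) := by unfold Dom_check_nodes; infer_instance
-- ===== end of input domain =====

-- B replaces A's per-cfg1-node linear scan of the remaining cfg2 ids by a one-pass index of
-- cfg2 ids grouped by expression plus a consumed counter per expression (objective: faster).

-- ===== PORT A =====
-- 'cfg2_nodes[k2] == e' of A's inner loop (dict lookup on the association list = first match)
def pvEM (cfg2_nodes : List (String × String)) (e : String) (k2 : String) : Bool :=
  ((cfg2_nodes.find? (fun q => q.1 == k2)).map Prod.snd) == some e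

-- body of A's outer loop; the inner 'for … break' is the first match in the remaining cfg2 ids.
-- '.getD st…' is the ValueError branch of list.remove, unreachable from A's initial state.
def pvStepA (cfg2_nodes : List (String × String))
    (st : PySem.Dict String String × List String × List String) (p : String × String) :
    PySem.Dict String String × List String × List String :=
  match st.2.2.find? (pvEM cfg2_nodes p.2) with
  | some k2 =>
      (st.1.insert p.1 k2,
       (PySem.List.remove? st.2.1 p.1).getD st.2.1,
       (PySem.List.remove? st.2.2 k2).getD st.2.2)
  | none => st

def check_nodes (cfg1_nodes : List (String × String)) (cfg2_nodes : List (String × String)) : (List (String × String)) × List String × List String :=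
  let diff1 := cfg1_nodes.foldl (fun acc p => acc ++ [p.1]) []
  let diff2 := cfg2_nodes.foldl (fun acc p => acc ++ [p.1]) []
  let st := cfg1_nodes.foldl (pvStepA cfg2_nodes) ((PySem.Dict.empty : PySem.Dict String String), diff1, diff2)
  (st.1.items, st.2.1, st.2.2)

-- ===== PORT B =====
-- queues: expression -> cfg2 ids with that expression, in order (Source B's setdefault/append loop)
def pvQueues (cfg2_nodes : List (String × String)) : PySem.Dict String (List String) :=
  cfg2_nodes.foldl (fun d p => d.modify p.2 [] (fun l => l ++ [p.1])) PySem.Dict.empty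

-- body of Source B's loop; state = (pairs, taken, matched2, diff1)
def pvStepB (queues : PySem.Dict String (List String))
    (st : PySem.Dict String String × PySem.Dict String Int × PySem.Set String × List String)
    (p : String × String) :
    PySem.Dict String String × PySem.Dict String Int × PySem.Set String × List String :=
  let q := queues.getD p.2 []
  let j := st.2.1.getD p.2 0
  if j < (q.length : Int) then
    let k2 := PySem.List.pyGetD q j ""
    (st.1.insert p.1 k2, st.2.1.insert p.2 (j + 1), PySem.Set.add st.2.2.1 k2, st.2.2.2)
  else
    (st.1, st.2.1, st.2.2.1, st.2.2.2 ++ [p.1])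

def check_nodes_alt (cfg1_nodes : List (String × String)) (cfg2_nodes : List (String × String)) : (List (String × String)) × List String × List String :=
  let queues := pvQueues cfg2_nodes
  let st := cfg1_nodes.foldl (pvStepB queues)
      ((PySem.Dict.empty : PySem.Dict String String), (PySem.Dict.empty : PySem.Dict String Int), PySem.Set.empty, [])
  let diff2 := (cfg2_nodes.map Prod.fst).filter (fun k => !(PySem.Set.contains st.2.2.1 k))
  (st.1.items, st.2.2.2, diff2)

-- ===== PRECONDITION & SPEC =====
-- Pre_ excludes association lists with duplicate keys: the Python arguments are dicts, whose
-- key lists are always duplicate-free, so no dict argument is excluded.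
def Pre_check_nodes (cfg1_nodes : List (String × String)) (cfg2_nodes : List (String × String)) : Prop :=
  (cfg1_nodes.map Prod.fst).Nodup ∧ (cfg2_nodes.map Prod.fst).Nodup
instance (cfg1_nodes : List (String × String)) (cfg2_nodes : List (String × String)) : Decidable (Pre_check_nodes cfg1_nodes cfg2_nodes) := by unfold Pre_check_nodes; infer_instance

def pvWitness_check_nodes : (List (String × String)) × (List (String × String)) :=
  ([("1", "x = 1"), ("2", "y")], [("a", "y"), ("b", "x = 1")])

def Spec_check_nodes (cfg1_nodes : List (String × String)) (cfg2_nodes : List (String × String)) (out : (List (String × String)) × List String × List String) : Prop := out = check_nodes_alt cfg1_nodes cfg2_nodes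
instance (cfg1_nodes : List (String × String)) (cfg2_nodes : List (String × String)) (out : (List (String × String)) × List String × List String) : Decidable (Spec_check_nodes cfg1_nodes cfg2_nodes out) := by unfold Spec_check_nodes; infer_instance

-- ===== CLAIM (what is proved, stated in full; the proofs are below) =====
def Claim_equal_check_nodes : Prop := ∀ (cfg1_nodes : List (String × String)) (cfg2_nodes : List (String × String)), Dom_check_nodes cfg1_nodes cfg2_nodes → Pre_check_nodes cfg1_nodes cfg2_nodes → Spec_check_nodes cfg1_nodes cfg2_nodes (check_nodes cfg1_nodes cfg2_nodes)

-- ===== LEMMAS AND PROOFS =====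

-- cfg2 ids carrying expression e, in cfg2 order (what pvQueues stores at key e)
def pvBy (cfg2_nodes : List (String × String)) (e : String) : List String :=
  (cfg2_nodes.filter (fun p => p.2 == e)).map Prod.fst

theorem pv_find_key (cfg2 : List (String × String)) (h2 : (cfg2.map Prod.fst).Nodup)
    (p : String × String) (hp : p ∈ cfg2) :
    cfg2.find? (fun q => q.1 == p.1) = some p := by
  induction cfg2 with
  | nil => cases hp
  | cons q t ih =>
    simp only [List.map_cons, List.nodup_cons] at h2
    rcases List.mem_cons.mp hp with h | h
    · subst h; simp
    · have hne : ¬ (q.1 == p.1) = true := by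
        simp only [beq_iff_eq]
        intro hq
        exact h2.1 (hq ▸ List.mem_map_of_mem h)
      simp only [List.find?_cons, hne]
      simpa [hne] using ih h2.2 h

theorem pv_em_of_mem (cfg2 : List (String × String)) (h2 : (cfg2.map Prod.fst).Nodup)
    (p : String × String) (hp : p ∈ cfg2) (e : String) :
    pvEM cfg2 e p.1 = (p.2 == e) := by
  simp [pvEM, pv_find_key cfg2 h2 p hp]

theorem pv_em_unique (cfg2 : List (String × String)) (k e e' : String)
    (h : pvEM cfg2 e k = true) (h' : pvEM cfg2 e' k = true) : e = e' := by
  unfold pvEM at h h'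
  cases hf : cfg2.find? (fun q => q.1 == k) with
  | none => simp [hf] at h
  | some v =>
    simp [hf] at h h'
    rw [← h, ← h']

theorem pv_contains_add (s : PySem.Set String) (x y : String) :
    PySem.Set.contains (PySem.Set.add s x) y = (PySem.Set.contains s y || y == x) := by
  by_cases h : x ∈ s <;> by_cases hy : y = x <;>
    simp [PySem.Set.contains, PySem.Set.add, h, hy]

-- the queue at key e is exactly pvBy cfg2 e
theorem pv_queues_getD (cfg2 : List (String × String)) (e : String) :
    (pvQueues cfg2).getD e [] = pvBy cfg2 e := by
  unfold pvQueues pvBy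
  have hmap : cfg2.foldl (fun d p => d.modify p.2 [] (fun l => l ++ [p.1])) PySem.Dict.empty
      = (cfg2.map (fun p => (p.2, p.1))).foldl (fun d p => d.modify p.1 [] (fun l => l ++ [p.2])) PySem.Dict.empty := by
    rw [List.foldl_map]
  rw [hmap, PySem.Dict.getD_foldl_modify_append]
  simp [List.filter_map, Function.comp_def]

-- initial h3: with nothing matched and nothing taken, the e-filtered remaining ids are pvBy e
theorem pv_filter_em (cfg2 : List (String × String)) (h2 : (cfg2.map Prod.fst).Nodup) (e : String) :
    (cfg2.map Prod.fst).filter (pvEM cfg2 e) = pvBy cfg2 e := by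
  unfold pvBy
  rw [List.filter_map]
  congr 1
  apply List.filter_congr
  intro p hp
  exact pv_em_of_mem cfg2 h2 p hp e

theorem pv_filter_comm (p q : String → Bool) (l : List String) :
    (l.filter q).filter p = (l.filter p).filter q := by
  rw [List.filter_filter, List.filter_filter]
  exact List.filter_congr (fun a _ => Bool.and_comm _ _)

-- THE LOOP INVARIANT: A's fold state is determined by B's fold state
theorem pvLoop (cfg2 : List (String × String)) (h2 : (cfg2.map Prod.fst).Nodup) :
    ∀ (l : List (String × String)) (pairs : PySem.Dict String String)
      (taken : PySem.Dict String Int) (matched : PySem.Set String) (db1 : List String),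
    (l.map Prod.fst).Nodup →
    (∀ p ∈ l, p.1 ∉ db1) →
    (∀ e, 0 ≤ taken.getD e 0) →
    (∀ e, ((cfg2.map Prod.fst).filter (fun k => !(PySem.Set.contains matched k))).filter (pvEM cfg2 e)
        = (pvBy cfg2 e).drop (taken.getD e 0).toNat) →
    l.foldl (pvStepA cfg2)
        (pairs, db1 ++ l.map Prod.fst,
         (cfg2.map Prod.fst).filter (fun k => !(PySem.Set.contains matched k)))
      = ((l.foldl (pvStepB (pvQueues cfg2)) (pairs, taken, matched, db1)).1,
         (l.foldl (pvStepB (pvQueues cfg2)) (pairs, taken, matched, db1)).2.2.2,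
         (cfg2.map Prod.fst).filter
           (fun k => !(PySem.Set.contains (l.foldl (pvStepB (pvQueues cfg2)) (pairs, taken, matched, db1)).2.2.1 k))) := by
  intro l
  induction l with
  | nil =>
    intro pairs taken matched db1 _ _ _ _
    simp
  | cons p l ih =>
    intro pairs taken matched db1 hnd hdb htk h3
    have hqnd : (pvBy cfg2 p.2).Nodup :=
      (h2.sublist (List.Sublist.map Prod.fst List.filter_sublist))
    have hfind : ((cfg2.map Prod.fst).filter (fun k => !(PySem.Set.contains matched k))).find? (pvEM cfg2 p.2)
        = (pvBy cfg2 p.2)[(taken.getD p.2 0).toNat]? := by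
      rw [← List.head?_filter, h3 p.2, List.head?_drop]
    simp only [List.map_cons, List.nodup_cons] at hnd
    cases hq : (pvBy cfg2 p.2)[(taken.getD p.2 0).toNat]? with
    | none =>
      -- no match: A leaves its state alone, B appends p.1 to diff1
      have hlen : ¬ (taken.getD p.2 0 < ((pvQueues cfg2).getD p.2 []).length) := by
        rw [pv_queues_getD]
        have := List.getElem?_eq_none_iff.mp hq
        have h0 := htk p.2
        omega
      have hA : pvStepA cfg2 (pairs, db1 ++ (p.1 :: l.map Prod.fst),
            (cfg2.map Prod.fst).filter (fun k => !(PySem.Set.contains matched k))) p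
          = (pairs, db1 ++ (p.1 :: l.map Prod.fst),
            (cfg2.map Prod.fst).filter (fun k => !(PySem.Set.contains matched k))) := by
        unfold pvStepA
        simp only [hfind, hq]
      have hB : pvStepB (pvQueues cfg2) (pairs, taken, matched, db1) p
          = (pairs, taken, matched, db1 ++ [p.1]) := by
        unfold pvStepB
        simp only [if_neg hlen]
      simp only [List.foldl_cons, List.map_cons, hA, hB]
      have := ih pairs taken matched (db1 ++ [p.1]) hnd.2
        (by intro r hr
            simp only [List.mem_append, List.mem_singleton, not_or]
            exact ⟨hdb r (List.mem_cons_of_mem p hr),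
                   fun h => hnd.1 (h ▸ List.mem_map_of_mem hr)⟩)
        htk h3
      simpa [List.append_assoc] using this
    | some k2 =>
      -- match: both sides pair p.1 with k2 = (pvBy cfg2 p.2)[j]
      have hjlt : (taken.getD p.2 0).toNat < (pvBy cfg2 p.2).length :=
        (List.getElem?_eq_some_iff.mp hq).1
      have hk2 : (pvBy cfg2 p.2)[(taken.getD p.2 0).toNat] = k2 :=
        (List.getElem?_eq_some_iff.mp hq).2
      have hdrop : (pvBy cfg2 p.2).drop (taken.getD p.2 0).toNat
          = k2 :: (pvBy cfg2 p.2).drop ((taken.getD p.2 0).toNat + 1) := by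
        rw [← hk2]
        exact (List.getElem_cons_drop hjlt).symm
      have hk2f : k2 ∈ ((cfg2.map Prod.fst).filter (fun k => !(PySem.Set.contains matched k))).filter (pvEM cfg2 p.2) := by
        rw [h3 p.2, hdrop]; exact List.mem_cons_self
      have hk2em : pvEM cfg2 p.2 k2 = true := List.of_mem_filter hk2f
      have hk2d2 : k2 ∈ (cfg2.map Prod.fst).filter (fun k => !(PySem.Set.contains matched k)) :=
        List.mem_of_mem_filter hk2f
      have hd2nd : ((cfg2.map Prod.fst).filter (fun k => !(PySem.Set.contains matched k))).Nodup :=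
        h2.filter _
      have hlen : (taken.getD p.2 0 < (((pvQueues cfg2).getD p.2 []).length : Int)) := by
        rw [pv_queues_getD]
        have h0 := htk p.2
        omega
      have hget : PySem.List.pyGetD ((pvQueues cfg2).getD p.2 []) (taken.getD p.2 0) "" = k2 := by
        rw [pv_queues_getD] at hlen ⊢
        rw [PySem.List.pyGetD_eq_getElem _ _ (htk p.2) hlen, hk2]
      have hA : pvStepA cfg2 (pairs, db1 ++ (p.1 :: l.map Prod.fst),
            (cfg2.map Prod.fst).filter (fun k => !(PySem.Set.contains matched k))) p
          = (pairs.insert p.1 k2, db1 ++ l.map Prod.fst,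
            ((cfg2.map Prod.fst).filter (fun k => !(PySem.Set.contains matched k))).filter (fun k => k != k2)) := by
        unfold pvStepA
        simp only [hfind, hq]
        have hrm1 : PySem.List.remove? (db1 ++ (p.1 :: l.map Prod.fst)) p.1
            = some (db1 ++ l.map Prod.fst) := by
          rw [PySem.List.remove?_eq_some_erase _ p.1
              (by simp), List.erase_append_right _ (hdb p List.mem_cons_self),
              List.erase_cons_head]
        have hrm2 : PySem.List.remove? ((cfg2.map Prod.fst).filter (fun k => !(PySem.Set.contains matched k))) k2
            = some (((cfg2.map Prod.fst).filter (fun k => !(PySem.Set.contains matched k))).filter (fun k => k != k2)) := by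
          rw [PySem.List.remove?_eq_some_erase _ k2 hk2d2, hd2nd.erase_eq_filter]
        simp only [hrm1, hrm2, Option.getD_some]
      have hB : pvStepB (pvQueues cfg2) (pairs, taken, matched, db1) p
          = (pairs.insert p.1 k2, taken.insert p.2 (taken.getD p.2 0 + 1),
             PySem.Set.add matched k2, db1) := by
        unfold pvStepB
        simp only [if_pos hlen, hget]
      have hmat : ∀ k, ((!(PySem.Set.contains (PySem.Set.add matched k2) k)) : Bool)
          = ((k != k2) && !(PySem.Set.contains matched k)) := by
        intro k
        rw [pv_contains_add]
        cases PySem.Set.contains matched k <;> cases hkk : (k == k2) <;> simp [hkk, bne]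
      have hfm : (cfg2.map Prod.fst).filter (fun k => !(PySem.Set.contains (PySem.Set.add matched k2) k))
          = ((cfg2.map Prod.fst).filter (fun k => !(PySem.Set.contains matched k))).filter (fun k => k != k2) := by
        rw [List.filter_filter]
        exact List.filter_congr (fun k _ => hmat k)
      -- the new h3
      have h3' : ∀ e, ((cfg2.map Prod.fst).filter (fun k => !(PySem.Set.contains (PySem.Set.add matched k2) k))).filter (pvEM cfg2 e)
          = (pvBy cfg2 e).drop ((taken.insert p.2 (taken.getD p.2 0 + 1)).getD e 0).toNat := by
        intro e
        rw [hfm]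
        have hcomm := pv_filter_comm (pvEM cfg2 e) (fun k => k != k2)
          ((cfg2.map Prod.fst).filter (fun k => !(PySem.Set.contains matched k)))
        rw [hcomm, h3 e, PySem.Dict.getD_insert]
        by_cases he : e = p.2
        · subst he
          rw [if_pos rfl, hdrop]
          have h0 := htk p.2
          have htn : (taken.getD p.2 0 + 1).toNat = (taken.getD p.2 0).toNat + 1 := by omega
          rw [htn]
          have hnodrop : k2 ∉ (pvBy cfg2 p.2).drop ((taken.getD p.2 0).toNat + 1) := by
            have : ((pvBy cfg2 p.2).drop (taken.getD p.2 0).toNat).Nodup :=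
              hqnd.sublist (List.drop_sublist _ _)
            rw [hdrop] at this
            exact (List.nodup_cons.mp this).1
          rw [List.filter_cons]
          simp only [bne_self_eq_false, Bool.false_eq_true, if_false]
          exact List.filter_eq_self.mpr (fun a ha => by
            simp only [bne_iff_ne, ne_eq]
            exact fun h => hnodrop (h ▸ ha))
        · rw [if_neg he]
          apply List.filter_eq_self.mpr
          intro a ha
          simp only [bne_iff_ne, ne_eq]
          intro h
          subst h
          have haem : pvEM cfg2 e a = true := by
            have : a ∈ ((cfg2.map Prod.fst).filter (fun k => !(PySem.Set.contains matched k))).filter (pvEM cfg2 e) := by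
              rw [h3 e]; exact ha
            exact List.of_mem_filter this
          exact he (pv_em_unique cfg2 a e p.2 haem hk2em)
      have htk' : ∀ e, 0 ≤ (taken.insert p.2 (taken.getD p.2 0 + 1)).getD e 0 := by
        intro e
        rw [PySem.Dict.getD_insert]
        by_cases he : e = p.2
        · rw [if_pos he]; have := htk p.2; omega
        · rw [if_neg he]; exact htk e
      simp only [List.foldl_cons, List.map_cons, hA, hB]
      have hih := ih (pairs.insert p.1 k2) (taken.insert p.2 (taken.getD p.2 0 + 1))
        (PySem.Set.add matched k2) db1 hnd.2
        (fun r hr => hdb r (List.mem_cons_of_mem p hr)) htk' h3'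
      rw [hfm] at hih
      exact hih

-- ===== VERDICT (by name: the statement is the Claim_ definition above) =====
theorem pv_filter_empty (L : List String) :
    L.filter (fun k => !(PySem.Set.contains (PySem.Set.empty : PySem.Set String) k)) = L := by
  apply List.filter_eq_self.mpr
  intro a _
  rfl

theorem check_nodes_spec : Claim_equal_check_nodes := by
  intro cfg1 cfg2 _hDom hPre
  obtain ⟨h1, h2⟩ := hPre
  have hinit := pvLoop cfg2 h2 cfg1 PySem.Dict.empty PySem.Dict.empty PySem.Set.empty []
    h1 (by intro p _ h; cases h)
    (by intro e; simp [PySem.Dict.getD_empty])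
    (by intro e
        simp only [PySem.Dict.getD_empty, Int.toNat_zero, List.drop_zero]
        rw [pv_filter_empty]
        exact pv_filter_em cfg2 h2 e)
  rw [pv_filter_empty] at hinit
  simp only [List.nil_append] at hinit
  unfold Spec_check_nodes
  simp only [check_nodes, check_nodes_alt, PySem.List.foldl_append_singleton_eq_map,
    List.nil_append, hinit]
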